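-- pv_equiv track=rewrite | github.com/hhmitchell/adventofcode | 2021/day03part2.py | process_list
-- ===== SOURCE A (Python) =====
-- def process_list(values, bit_pos, bit_value):
--     results = ([], [])
--     for value in values:
--         results[int(value[bit_pos])].append(value)
--
--     if bit_value == 0:
--         return results[0] if len(results[0]) <= len(results[1]) else results[1]
--     else:
--         return results[1] if len(results[1]) >= len(results[0]) else results[0]
-- ===== SOURCE B (Python) =====
-- def process_list(values, bit_pos, bit_value):
--     count1 = sum(int(v[bit_pos]) for v in values)
--     count0 = len(values) - count1
--     if bit_value == 0:
--         target = 0 if count0 <= count1 else 1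
--     else:
--         target = 1 if count1 >= count0 else 0
--     return [v for v in values if int(v[bit_pos]) == target]
-- ===== Notes on version B (the rewrite author's own statement) =====
-- stated objective: simpler
-- what changed: B never builds the two buckets: it counts the '1' bits in one pass, derives the kept target bit from the counts with the same tie-break rules, and returns a single order-preserving filter of the input.
import Mathlib
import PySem

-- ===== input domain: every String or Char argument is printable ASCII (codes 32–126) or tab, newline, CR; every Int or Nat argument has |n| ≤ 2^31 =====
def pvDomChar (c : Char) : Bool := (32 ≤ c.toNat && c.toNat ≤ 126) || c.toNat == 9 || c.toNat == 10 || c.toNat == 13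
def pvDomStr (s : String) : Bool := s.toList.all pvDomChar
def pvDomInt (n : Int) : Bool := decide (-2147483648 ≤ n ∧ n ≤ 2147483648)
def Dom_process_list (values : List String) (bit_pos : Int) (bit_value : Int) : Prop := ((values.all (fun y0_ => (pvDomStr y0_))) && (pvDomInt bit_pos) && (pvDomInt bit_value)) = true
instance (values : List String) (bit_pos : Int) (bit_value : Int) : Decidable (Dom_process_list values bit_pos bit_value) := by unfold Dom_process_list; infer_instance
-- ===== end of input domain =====

-- B drops A's two buckets: it counts '1' bits in one pass, derives the kept target bit, and filters once.


-- ===== PORT A =====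
-- helper: int(value[bit_pos]) == 1, i.e. the character at bit_pos is '1' (Pre_ guarantees it is '0' or '1')
def pvBit1 (v : String) (bit_pos : Int) : Bool := PySem.Str.pyGet? v bit_pos == some '1'

def process_list (values : List String) (bit_pos : Int) (bit_value : Int) : List String :=
  let results := values.foldl
    (fun (r : List String × List String) v =>
      if pvBit1 v bit_pos then (r.1, r.2 ++ [v]) else (r.1 ++ [v], r.2))
    ([], [])
  if bit_value == 0 then
    if results.1.length ≤ results.2.length then results.1 else results.2
  else
    if results.2.length ≥ results.1.length then results.2 else results.1

-- ===== PORT B =====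
def process_list_alt (values : List String) (bit_pos : Int) (bit_value : Int) : List String :=
  let count1 : Int := values.foldl (fun acc v => acc + (if pvBit1 v bit_pos then 1 else 0)) 0
  let count0 : Int := (values.length : Int) - count1
  let target : Int :=
    if bit_value == 0 then (if count0 ≤ count1 then 0 else 1)
    else (if count1 ≥ count0 then 1 else 0)
  values.filter (fun v => (if pvBit1 v bit_pos then (1 : Int) else 0) == target)

-- ===== PRECONDITION & SPEC =====
-- Pre_ excludes exactly the inputs where Python A raises: some value lacks a '0'/'1' character at bit_pos.
def Pre_process_list (values : List String) (bit_pos : Int) (bit_value : Int) : Prop :=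
  ∀ v ∈ values, PySem.Str.pyGet? v bit_pos = some '0' ∨ PySem.Str.pyGet? v bit_pos = some '1'
instance (values : List String) (bit_pos : Int) (bit_value : Int) : Decidable (Pre_process_list values bit_pos bit_value) := by unfold Pre_process_list; infer_instance
def pvWitness_process_list : List String × Int × Int := (["10", "01", "11"], 0, 1)

def Spec_process_list (values : List String) (bit_pos : Int) (bit_value : Int) (out : List String) : Prop := out = process_list_alt values bit_pos bit_value
instance (values : List String) (bit_pos : Int) (bit_value : Int) (out : List String) : Decidable (Spec_process_list values bit_pos bit_value out) := by unfold Spec_process_list; infer_instance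

-- ===== CLAIM (what is proved, stated in full; the proofs are below) =====
def Claim_equal_process_list : Prop := ∀ (values : List String) (bit_pos : Int) (bit_value : Int), Dom_process_list values bit_pos bit_value → Pre_process_list values bit_pos bit_value → Spec_process_list values bit_pos bit_value (process_list values bit_pos bit_value)

-- ===== LEMMAS AND PROOFS =====

-- A's loop builds exactly (filter ¬bit1, filter bit1), appended to the accumulator.
theorem pvFold_buckets (bit_pos : Int) (values : List String) (a b : List String) :
    values.foldl
      (fun (r : List String × List String) v =>
        if pvBit1 v bit_pos then (r.1, r.2 ++ [v]) else (r.1 ++ [v], r.2))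
      (a, b)
    = (a ++ values.filter (fun v => !pvBit1 v bit_pos),
       b ++ values.filter (fun v => pvBit1 v bit_pos)) := by
  induction values generalizing a b with
  | nil => simp
  | cons v vs ih =>
    by_cases h : pvBit1 v bit_pos = true <;> simp [h, ih]

-- B's counting loop computes the length of the '1' bucket.
theorem pvFold_count (bit_pos : Int) (values : List String) (a : Int) :
    values.foldl (fun acc v => acc + (if pvBit1 v bit_pos then 1 else 0)) a
    = a + ((values.filter (fun v => pvBit1 v bit_pos)).length : Int) := by
  induction values generalizing a with
  | nil => simp
  | cons v vs ih =>
    by_cases h : pvBit1 v bit_pos = true <;> simp [h, ih] <;> ring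

theorem pvLen_split (bit_pos : Int) (values : List String) :
    (values.filter (fun v => !pvBit1 v bit_pos)).length
      + (values.filter (fun v => pvBit1 v bit_pos)).length = values.length := by
  induction values with
  | nil => simp
  | cons v vs ih =>
    by_cases h : pvBit1 v bit_pos = true <;> simp [h] <;> omega

-- ===== VERDICT (by name: the statement is the Claim_ definition above) =====
theorem process_list_spec : Claim_equal_process_list := by
  intro values bit_pos bit_value _ _
  unfold Spec_process_list process_list process_list_alt
  rw [pvFold_buckets, pvFold_count]
  simp only [List.nil_append, Int.zero_add]
  have hsplit := pvLen_split bit_pos values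
  set c1 := (values.filter (fun v => pvBit1 v bit_pos)).length with hc1
  set c0 := (values.filter (fun v => !pvBit1 v bit_pos)).length with hc0
  have hfilter0 : values.filter (fun v => (if pvBit1 v bit_pos then (1 : Int) else 0) == 0)
      = values.filter (fun v => !pvBit1 v bit_pos) := by
    apply List.filter_congr
    intro v _
    by_cases h : pvBit1 v bit_pos = true <;> simp [h]
  have hfilter1 : values.filter (fun v => (if pvBit1 v bit_pos then (1 : Int) else 0) == 1)
      = values.filter (fun v => pvBit1 v bit_pos) := by
    apply List.filter_congr
    intro v _
    by_cases h : pvBit1 v bit_pos = true <;> simp [h]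
  by_cases hb : bit_value = 0
  · simp only [hb, beq_self_eq_true, if_true]
    by_cases hle : ((values.length : Int) - c1 ≤ (c1 : Int))
    · rw [if_pos hle, if_pos (by omega), hfilter0]
    · rw [if_neg hle, if_neg (by omega), hfilter1]
  · simp only [beq_iff_eq, hb, if_false]
    by_cases hge : ((c1 : Int) ≥ (values.length : Int) - c1)
    · rw [if_pos hge, if_pos (by omega), hfilter1]
    · rw [if_neg hge, if_neg (by omega), hfilter0]
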